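-- pv_equiv track=rewrite | github.com/suv11235/thought_anchors | src/attention/receiver_heads.py | _find_sentence_boundaries
-- ===== SOURCE A (Python) =====
-- from typing import List, Dict, Any, Optional, Tuple
--
-- def _find_sentence_boundaries(tokens: List[str]) -> List[Tuple[int, int]]:
--     """Find sentence boundaries in tokens."""
--     boundaries = []
--     start = 0
--
--     for i, token in enumerate(tokens):
--         # Simple heuristic: sentence ends with period, exclamation, or question mark
--         if token in ['.', '!', '?']:
--             boundaries.append((start, i + 1))
--             start = i + 1
--
--     # Add final sentence if not empty
--     if start < len(tokens):
--         boundaries.append((start, len(tokens)))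
--
--     return boundaries
-- ===== SOURCE B (Python) =====
-- from typing import List, Tuple
--
-- def _find_sentence_boundaries(tokens: List[str]) -> List[Tuple[int, int]]:
--     """Find sentence boundaries by recursive splitting at the next delimiter."""
--     delims = ('.', '!', '?')
--
--     def next_delim(pos: int):
--         for k in range(pos, len(tokens)):
--             if tokens[k] in delims:
--                 return k
--         return None
--
--     def go(pos: int) -> List[Tuple[int, int]]:
--         if pos >= len(tokens):
--             return []
--         j = next_delim(pos)
--         if j is None:
--             return [(pos, len(tokens))]
--         return [(pos, j + 1)] + go(j + 1)
--
--     return go(0)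
-- ===== Notes on version B (the rewrite author's own statement) =====
-- stated objective: alternative
-- what changed: Replaces A's single stateful loop carrying (boundaries, start) with a recursive splitter: repeatedly search for the next delimiter from the current position and emit one span per step, with the trailing span emitted when no delimiter remains.
import Mathlib
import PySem

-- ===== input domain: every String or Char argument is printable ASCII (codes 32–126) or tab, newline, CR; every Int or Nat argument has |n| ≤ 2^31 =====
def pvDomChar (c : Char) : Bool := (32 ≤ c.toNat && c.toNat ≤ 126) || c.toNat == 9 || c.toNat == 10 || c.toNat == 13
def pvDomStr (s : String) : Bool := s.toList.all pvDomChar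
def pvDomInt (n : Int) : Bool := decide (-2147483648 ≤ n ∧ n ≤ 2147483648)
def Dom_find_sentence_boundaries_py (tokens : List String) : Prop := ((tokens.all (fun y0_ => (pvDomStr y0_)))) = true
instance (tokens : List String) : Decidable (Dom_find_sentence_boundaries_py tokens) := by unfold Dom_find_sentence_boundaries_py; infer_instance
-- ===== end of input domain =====

-- B replaces A's single stateful (boundaries, start) loop by a recursive splitter:
-- find the next delimiter, emit one span, recurse on the rest (objective: alternative).


-- ===== PORT A =====
-- the loop 'for i, token in enumerate(tokens)', carrying boundaries and start
def pvALoop (ts : List String) (i start : Int) (acc : List (Int × Int)) :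
    List (Int × Int) × Int :=
  match ts with
  | [] => (acc, start)
  | t :: rest =>
    if t == "." || t == "!" || t == "?" then
      pvALoop rest (i + 1) (i + 1) (acc ++ [(start, i + 1)])
    else
      pvALoop rest (i + 1) start acc

def find_sentence_boundaries_py (tokens : List String) : List (Int × Int) :=
  let r := pvALoop tokens 0 0 []
  if r.2 < (tokens.length : Int) then r.1 ++ [(r.2, (tokens.length : Int))] else r.1

-- ===== PORT B =====
-- 'next_delim': linear scan for the first delimiter, as a relative offset
def pvFindDelim (ts : List String) : Option Nat :=
  match ts with
  | [] => none
  | t :: rest =>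
    if t == "." || t == "!" || t == "?" then some 0
    else (pvFindDelim rest).map (· + 1)

-- 'go(pos)': emit one span up to the next delimiter (or to the end), recurse
def pvGo (ts : List String) (pos total : Int) : List (Int × Int) :=
  if ts.isEmpty then []
  else
    match pvFindDelim ts with
    | none => [(pos, total)]
    | some j => (pos, pos + (j : Int) + 1) :: pvGo (ts.drop (j + 1)) (pos + (j : Int) + 1) total
termination_by ts.length
decreasing_by
  simp only [List.length_drop]
  have h' : ts.length ≠ 0 := by simp_all
  omega

def find_sentence_boundaries_py_alt (tokens : List String) : List (Int × Int) :=
  pvGo tokens 0 (tokens.length : Int)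

-- ===== PRECONDITION & SPEC =====
def Spec_find_sentence_boundaries_py (tokens : List String) (out : List (Int × Int)) : Prop := out = find_sentence_boundaries_py_alt tokens
instance (tokens : List String) (out : List (Int × Int)) : Decidable (Spec_find_sentence_boundaries_py tokens out) := by unfold Spec_find_sentence_boundaries_py; infer_instance

-- ===== CLAIM (what is proved, stated in full; the proofs are below) =====
def Claim_equal_find_sentence_boundaries_py : Prop := ∀ (tokens : List String), Dom_find_sentence_boundaries_py tokens → Spec_find_sentence_boundaries_py tokens (find_sentence_boundaries_py tokens)

-- ===== LEMMAS AND PROOFS =====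

-- proof-only helper: the list of cut points (i+1 for each delimiter at index i)
def pvCuts (ts : List String) (i : Int) : List Int :=
  match ts with
  | [] => []
  | t :: rest =>
    if t == "." || t == "!" || t == "?" then (i + 1) :: pvCuts rest (i + 1)
    else pvCuts rest (i + 1)

-- proof-only helper: pairs of adjacent boundary points
def pvPairAdj (l : List Int) : List (Int × Int) := List.zip l l.tail

-- the A-loop computes exactly the adjacent-pairs of (start :: cuts), and its final
-- start is the last element of that boundary list
theorem pvALoop_eq (ts : List String) :
    ∀ (i start : Int) (acc : List (Int × Int)),
      pvALoop ts i start acc =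
        (acc ++ List.zip (start :: pvCuts ts i) (pvCuts ts i),
         (pvCuts ts i).getLastD start) := by
  induction ts with
  | nil => intro i start acc; simp [pvALoop, pvCuts]
  | cons t rest ih =>
    intro i start acc
    by_cases h : (t == "." || t == "!" || t == "?") = true
    · simp [pvALoop, pvCuts, h, ih]
      cases pvCuts rest (i + 1) <;> simp [List.getLast?_cons]
    · simp [pvALoop, pvCuts, h, ih]

theorem zip_tail_append : ∀ (l : List Int) (x : Int), l ≠ [] →
    List.zip (l ++ [x]) (l ++ [x]).tail =
      List.zip l l.tail ++ [(l.getLastD 0, x)] := by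
  intro l
  induction l with
  | nil => intro x h; simp at h
  | cons a l ih =>
    intro x _
    cases l with
    | nil => simp [List.zip]
    | cons b l' =>
      have := ih x (by simp)
      simp only [List.cons_append, List.tail_cons, List.zip_cons_cons,
        List.getLastD_cons] at this ⊢
      rw [this]

-- no delimiter ↔ empty cut list
theorem pvFindDelim_none_iff (ts : List String) (i : Int) :
    pvFindDelim ts = none ↔ pvCuts ts i = [] := by
  induction ts generalizing i with
  | nil => simp [pvFindDelim, pvCuts]
  | cons t rest ih =>
    by_cases h : (t == "." || t == "!" || t == "?") = true
    · simp [pvFindDelim, pvCuts, h]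
    · rw [pvFindDelim, pvCuts]
      simp only [if_neg h, Option.map_eq_none_iff]
      exact ih (i + 1)

-- a found delimiter offset lies inside the list
theorem pvFindDelim_lt (ts : List String) (j : Nat)
    (h : pvFindDelim ts = some j) : j < ts.length := by
  induction ts generalizing j with
  | nil => simp [pvFindDelim] at h
  | cons t rest ih =>
    by_cases hd : (t == "." || t == "!" || t == "?") = true
    · simp [pvFindDelim, hd] at h
      simp only [List.length_cons]
      omega
    · simp [pvFindDelim, hd] at h
      obtain ⟨j', hj', rfl⟩ := h
      have := ih j' hj'
      simp
      omega

-- first delimiter at offset j ⇒ cuts = (i+j+1) :: cuts of the suffix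
theorem pvCuts_of_findDelim (ts : List String) (j : Nat)
    (h : pvFindDelim ts = some j) (i : Int) :
    pvCuts ts i = (i + (j : Int) + 1) :: pvCuts (ts.drop (j + 1)) (i + (j : Int) + 1) := by
  induction ts generalizing j i with
  | nil => simp [pvFindDelim] at h
  | cons t rest ih =>
    by_cases hd : (t == "." || t == "!" || t == "?") = true
    · simp [pvFindDelim, hd] at h
      subst h
      simp [pvCuts, hd]
    · simp [pvFindDelim, hd] at h
      obtain ⟨j', hj', rfl⟩ := h
      have := ih j' hj' (i + 1)
      simp [pvCuts, hd, this]
      constructor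
      · ring
      · congr 1; ring

-- B's recursive splitter equals the adjacent-pairs form of the boundary list
theorem pvGo_eq : ∀ (ts : List String) (pos : Int),
      pvGo ts pos (pos + (ts.length : Int)) =
        pvPairAdj
          (if (pvCuts ts pos).getLastD pos < pos + (ts.length : Int)
           then (pos :: pvCuts ts pos) ++ [pos + (ts.length : Int)]
           else pos :: pvCuts ts pos) := by
  intro ts pos
  induction ts, pos using pvGo.induct with
  | case1 ts pos h =>
    have : ts = [] := by cases ts <;> simp_all [List.isEmpty]
    subst this
    simp [pvGo, pvCuts, pvPairAdj]
  | case2 ts pos h hf =>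
    rw [pvGo, if_neg (by simp [h])]
    simp only [hf]
    rw [pvFindDelim_none_iff ts pos] at hf
    have hlen : (0:Int) < (ts.length : Int) := by
      cases ts with
      | nil => simp at h
      | cons a l => simp
    rw [hf]
    rw [if_pos (by simpa using hlen)]
    simp [pvPairAdj, List.zip]
  | case3 ts pos h j hf ih =>
    rw [pvGo, if_neg (by simp [h])]
    simp only [hf]
    have hcuts := pvCuts_of_findDelim ts j hf pos
    have hjlt : j + 1 ≤ ts.length := pvFindDelim_lt ts j hf
    have hlen : ((ts.drop (j+1)).length : Int) = (ts.length : Int) - ((j:Int) + 1) := by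
      simp [List.length_drop]; omega
    have htot : (pos + (j:Int) + 1) + ((ts.drop (j+1)).length : Int) = pos + (ts.length : Int) := by
      rw [hlen]; ring
    rw [htot] at ih
    rw [ih, hcuts]
    set c := pos + (j : Int) + 1 with hc
    set T := pos + (ts.length : Int) with hT
    set cs := pvCuts (ts.drop (j+1)) c with hcs
    have hlast : (c :: cs).getLastD pos = cs.getLastD c := by
      cases cs <;> simp [List.getLast?_cons]
    rw [hlast]
    split_ifs with hcond
    · -- append case on both sides
      cases cs <;> simp [pvPairAdj, List.zip]
    · simp only [pvPairAdj]
      cases cs with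
      | nil => simp [List.zip]
      | cons b l => simp

-- ===== VERDICT (by name: the statement is the Claim_ definition above) =====
theorem find_sentence_boundaries_py_spec : Claim_equal_find_sentence_boundaries_py := by
  intro tokens _
  unfold Spec_find_sentence_boundaries_py find_sentence_boundaries_py
    find_sentence_boundaries_py_alt
  rw [pvALoop_eq]
  have := pvGo_eq tokens 0
  rw [zero_add] at this
  rw [this]
  simp only [List.nil_append]
  split_ifs with h
  · rw [show ((0:Int) :: pvCuts tokens 0) ++ [(tokens.length : Int)] =
        ((0:Int) :: pvCuts tokens 0) ++ [(tokens.length : Int)] from rfl]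
    rw [pvPairAdj, zip_tail_append _ _ (by simp)]
    congr 1
    cases pvCuts tokens 0 <;> simp [List.getLast?_cons]
  · rfl
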